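-- pv_equiv track=rewrite | github.com/ReelTalkers/reel-algorithm | scripts/trim_datasets.py | get_users_to_keep
-- ===== SOURCE A (Python) =====
-- def get_users_to_keep(ratings_per_user, num_ratings):
--     users_to_keep = set()
--     curr_ratings = 0
--
--     for user in sorted(ratings_per_user.keys(), key=lambda x: ratings_per_user[x], reverse=True):
--         if(curr_ratings > num_ratings):
--             break
--
--         users_to_keep.add(user)
--         curr_ratings += ratings_per_user[user]
--
--     return users_to_keep
-- ===== SOURCE B (Python) =====
-- def get_users_to_keep(ratings_per_user, num_ratings):
--     order = sorted(ratings_per_user, key=ratings_per_user.get, reverse=True)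
--     presums = [0]
--     for u in order:
--         presums.append(presums[-1] + ratings_per_user[u])
--     cut = next((i for i, p in enumerate(presums) if p > num_ratings), len(order))
--     return set(order[:cut])
-- ===== Notes on version B (the rewrite author's own statement) =====
-- stated objective: alternative
-- what changed: A's imperative loop that grows a set while tracking a running total and breaking mid-iteration is replaced by a declarative pipeline: build a prefix-sum table of the sorted ratings seeded with 0, locate the first index whose preceding cumulative exceeds the threshold, and return the set of the slice up to that index.
import Mathlib
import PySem

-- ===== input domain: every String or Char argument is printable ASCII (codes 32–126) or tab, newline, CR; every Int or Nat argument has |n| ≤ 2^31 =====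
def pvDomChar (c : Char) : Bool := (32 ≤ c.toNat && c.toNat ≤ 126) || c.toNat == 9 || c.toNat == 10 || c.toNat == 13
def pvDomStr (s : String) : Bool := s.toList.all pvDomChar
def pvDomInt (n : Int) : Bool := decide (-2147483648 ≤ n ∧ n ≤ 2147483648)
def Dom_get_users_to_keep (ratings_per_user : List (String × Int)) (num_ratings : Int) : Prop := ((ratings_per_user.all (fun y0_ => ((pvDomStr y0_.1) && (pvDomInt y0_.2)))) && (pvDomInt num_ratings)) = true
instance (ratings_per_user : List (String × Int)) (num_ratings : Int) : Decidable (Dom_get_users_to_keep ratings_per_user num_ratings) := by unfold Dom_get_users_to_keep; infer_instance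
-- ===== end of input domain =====

-- B replaces A's imperative running-total-with-break set loop by a prefix-sum table,
-- a declarative first-crossing cutoff index and a slice; objective: alternative decomposition (same cost).


-- ===== PORT A =====
-- the for-loop with its break: state (curr_ratings, users_to_keep); the lookup ratings_per_user[user]
-- is getD _ 0 — user is drawn from d.keys, so the key is always present and KeyError is impossible
def pvALoop (d : PySem.Dict String Int) (num_ratings : Int) :
    List String → Int → PySem.Set String → PySem.Set String
  | [], _, users => users
  | user :: rest, curr, users =>
    if curr > num_ratings then users
    else pvALoop d num_ratings rest (curr + d.getD user 0) (users.add user)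

def get_users_to_keep (ratings_per_user : List (String × Int)) (num_ratings : Int) : List String :=
  let d := PySem.Dict.ofList ratings_per_user
  pvALoop d num_ratings (PySem.List.sorted d.keys (fun x => d.getD x 0) true) 0 PySem.Set.empty

-- ===== PORT B =====
-- Source B: sort, build the prefix-sum table presums (presums[-1] is pyGetD _ (-1) 0; the list is never
-- empty), cut = next((i for i, p in enumerate(presums) if p > num_ratings), len(order)) ported as
-- findIdx?/getD, return set(order[:cut]) (cut is a Nat here, so order[:cut] is List.take)
def get_users_to_keep_alt (ratings_per_user : List (String × Int)) (num_ratings : Int) : List String :=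
  let d := PySem.Dict.ofList ratings_per_user
  let order := PySem.List.sorted d.keys (fun x => d.getD x 0) true
  let presums := order.foldl (fun ps u => ps ++ [PySem.List.pyGetD ps (-1) 0 + d.getD u 0]) [0]
  let cut := (presums.findIdx? (fun p => p > num_ratings)).getD order.length
  PySem.Set.ofList (order.take cut)

-- ===== PRECONDITION & SPEC =====
def Spec_get_users_to_keep (ratings_per_user : List (String × Int)) (num_ratings : Int) (out : List String) : Prop := out = get_users_to_keep_alt ratings_per_user num_ratings
instance (ratings_per_user : List (String × Int)) (num_ratings : Int) (out : List String) : Decidable (Spec_get_users_to_keep ratings_per_user num_ratings out) := by unfold Spec_get_users_to_keep; infer_instance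

-- ===== CLAIM (what is proved, stated in full; the proofs are below) =====
def Claim_equal_get_users_to_keep : Prop := ∀ (ratings_per_user : List (String × Int)) (num_ratings : Int), Dom_get_users_to_keep ratings_per_user num_ratings → Spec_get_users_to_keep ratings_per_user num_ratings (get_users_to_keep ratings_per_user num_ratings)

-- ===== LEMMAS AND PROOFS =====

-- number of users A's loop consumes before the break fires, given their ratings and the running total
def pvCutN (num : Int) : List Int → Int → Nat
  | [], _ => 0
  | v :: rest, curr => if curr > num then 0 else pvCutN num rest (curr + v) + 1

-- the prefix-sum list [curr, curr+v0, curr+v0+v1, …]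
def pvScan (c : Int) : List Int → List Int
  | [] => [c]
  | v :: r => c :: pvScan (c + v) r

theorem pvGetD_last {xs : List Int} {c : Int} :
    PySem.List.pyGetD (xs ++ [c]) (-1) 0 = c := by
  simp [PySem.List.pyGetD, PySem.List.pyGet?, PySem.List.pyIdx?]

theorem pvALoop_take (d : PySem.Dict String Int) (num : Int) :
    ∀ (us : List String) (curr : Int) (s : PySem.Set String),
      pvALoop d num us curr s
        = (us.take (pvCutN num (us.map (fun u => d.getD u 0)) curr)).foldl PySem.Set.add s := by
  intro us
  induction us with
  | nil => intro curr s; simp [pvALoop, pvCutN]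
  | cons u rest ih =>
    intro curr s
    simp only [pvALoop, pvCutN, List.map_cons]
    by_cases h : curr > num
    · simp [h]
    · simp only [h, if_false, List.take_succ_cons, List.foldl_cons]
      exact ih (curr + d.getD u 0) (s.add u)

theorem pvFold_scan (d : PySem.Dict String Int) :
    ∀ (us : List String) (ps : List Int) (c : Int),
      us.foldl (fun ps u => ps ++ [PySem.List.pyGetD ps (-1) 0 + d.getD u 0]) (ps ++ [c])
        = ps ++ pvScan c (us.map (fun u => d.getD u 0)) := by
  intro us
  induction us with
  | nil => intro ps c; simp [pvScan]
  | cons u rest ih =>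
    intro ps c
    simp only [List.foldl_cons, pvGetD_last, List.map_cons, pvScan]
    rw [List.append_assoc ps [c] [c + d.getD u 0]] -- reassociate to feed the IH
    have := ih (ps ++ [c]) (c + d.getD u 0)
    simpa using this

theorem pvFind_scan (num : Int) :
    ∀ (vals : List Int) (curr : Int),
      ((pvScan curr vals).findIdx? (fun p => p > num)).getD vals.length
        = pvCutN num vals curr := by
  intro vals
  induction vals with
  | nil =>
    intro curr
    by_cases h : curr > num <;> simp [pvScan, pvCutN, List.findIdx?_cons, h]
  | cons v rest ih =>
    intro curr
    simp only [pvScan, pvCutN, List.findIdx?_cons, List.length_cons]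
    by_cases h : curr > num
    · simp [h]
    · simp only [h, decide_false, if_neg, Bool.false_eq_true, not_false_eq_true]
      rw [← ih (curr + v)]
      cases hf : (pvScan (curr + v) rest).findIdx? (fun p => p > num) <;> simp

-- A = B, stated let-free (the ports' bodies zeta-reduce to exactly these terms)
theorem pvMain (d : PySem.Dict String Int) (num : Int) :
    pvALoop d num (PySem.List.sorted d.keys (fun x => d.getD x 0) true) 0 PySem.Set.empty
      = PySem.Set.ofList ((PySem.List.sorted d.keys (fun x => d.getD x 0) true).take
          ((((PySem.List.sorted d.keys (fun x => d.getD x 0) true).foldl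
              (fun ps u => ps ++ [PySem.List.pyGetD ps (-1) 0 + d.getD u 0]) [0]).findIdx?
              (fun p => p > num)).getD (PySem.List.sorted d.keys (fun x => d.getD x 0) true).length)) := by
  set order := PySem.List.sorted d.keys (fun x => d.getD x 0) true with horder
  have hps : order.foldl (fun ps u => ps ++ [PySem.List.pyGetD ps (-1) 0 + d.getD u 0]) [0]
      = pvScan 0 (order.map (fun u => d.getD u 0)) := by
    have := pvFold_scan d order [] 0
    simpa using this
  rw [hps, pvALoop_take d num order 0 PySem.Set.empty, PySem.Set.ofList_eq_foldl]
  have hlen : order.length = (order.map (fun u => d.getD u 0)).length := by simp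
  rw [hlen, pvFind_scan num (order.map (fun u => d.getD u 0)) 0]
  rfl

-- ===== VERDICT (by name: the statement is the Claim_ definition above) =====
theorem get_users_to_keep_spec : Claim_equal_get_users_to_keep := by
  intro rpu num _
  exact pvMain (PySem.Dict.ofList rpu) num
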